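-- pv_equiv track=rewrite | github.com/izikeros/ci_checks | count_method_lines.py | count_method_len
-- ===== SOURCE A (Python) =====
-- def line_is_comment(li):
--     if li.startswith("#"):
--         return True
--     return False
--
-- def get_method_name(li):
--     return li.split("(")[0].replace("def ", "")
--
-- def end_of_method(line):
--     # if empty line encounted - new method is assumed
--     is_end = not line.strip()
--
--     # TODO: KS: 29 Jun 2018: check function body indentation and
--     # TODO: KS: 29 Jun 2018: see: http://code-monkey.readthedocs.io/en/latest/index.html
--     return is_end
--
-- def count_method_len(lines_list):
--     methods_dict = {}
--     method_name = None
--     for li in lines_list: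
--         if end_of_method(line=li):
--             method_name = None
--         elif line_is_comment(li):
--             continue
--         elif li.startswith("def "):
--             method_name = get_method_name(li)
--             methods_dict[method_name] = 0
--         else:
--             if method_name in methods_dict:
--                 methods_dict[method_name] += 1
--     return methods_dict
-- ===== SOURCE B (Python) =====
-- def count_method_len(lines_list):
--     # For each "def " line, count its body by scanning forward until a blank
--     # line or the next "def " line; comment lines are skipped (not counted).
--     counts = {}
--     n = len(lines_list)
--     for i, li in enumerate(lines_list):
--         if li.startswith("def "):
--             name = li.split("(")[0].replace("def ", "")
--             body = 0
--             j = i + 1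
--             while j < n:
--                 s = lines_list[j]
--                 if not s.strip() or s.startswith("def "):
--                     break
--                 if not s.startswith("#"):
--                     body += 1
--                 j += 1
--             counts[name] = body
--     return counts
-- ===== Notes on version B (the rewrite author's own statement) =====
-- stated objective: alternative
-- what changed: A is a single-pass state machine carrying a current-method register mutated line by line; B instead loops over the 'def ' lines and, for each, counts its body by a forward scan to the next blank or 'def ' line, with no cross-line state beyond the dict.
import Mathlib
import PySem

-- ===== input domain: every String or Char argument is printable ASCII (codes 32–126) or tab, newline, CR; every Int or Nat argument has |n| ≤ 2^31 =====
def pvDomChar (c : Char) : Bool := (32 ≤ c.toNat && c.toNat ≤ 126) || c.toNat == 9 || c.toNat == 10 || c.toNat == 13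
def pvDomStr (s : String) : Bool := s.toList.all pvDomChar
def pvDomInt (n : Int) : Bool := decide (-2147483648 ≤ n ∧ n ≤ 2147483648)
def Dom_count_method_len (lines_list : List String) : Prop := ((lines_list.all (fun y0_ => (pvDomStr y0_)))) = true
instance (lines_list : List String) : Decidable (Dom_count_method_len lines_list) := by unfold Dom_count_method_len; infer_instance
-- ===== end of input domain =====

-- B replaces A's one-pass state machine (current-method register mutated line by line) by a
-- per-"def" forward scan: for each "def " line, its body length is counted by scanning ahead
-- until a blank or the next "def " line; same return value, no state machine (objective: alternative).

-- ===== PORT A =====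
-- helper line_is_comment
def pyLineIsComment (li : String) : Bool :=
  if PySem.Str.startswith li "#" then true else false

-- helper get_method_name: li.split("(")[0].replace("def ", "")
def pyGetMethodName (li : String) : String :=
  PySem.Str.replace (((PySem.Str.split? li "(").getD []).headD "") "def " ""

-- helper end_of_method: not line.strip()
def pyEndOfMethod (line : String) : Bool :=
  PySem.Str.len (PySem.Str.strip line) == 0

-- the body of A's for-loop, as a fold step over (methods_dict, method_name)
def cmlStepA (st : PySem.Dict String Int × Option String) (li : String) :
    PySem.Dict String Int × Option String :=
  if pyEndOfMethod li then (st.1, none)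
  else if pyLineIsComment li then st
  else if PySem.Str.startswith li "def " then
    let m := pyGetMethodName li
    (st.1.insert m 0, some m)
  else
    match st.2 with
    | some m => if st.1.contains m then (st.1.modify m 0 (· + 1), some m) else st
    | none => st   -- `None in methods_dict` is False

def count_method_len (lines_list : List String) : List (String × Int) :=
  (lines_list.foldl cmlStepA ((PySem.Dict.empty : PySem.Dict String Int), none)).1.items

-- ===== PORT B =====
-- B's inner while-loop over lines_list[j], j = i+1, i+2, … rendered as structural recursion
-- over the remaining suffix (exact: same lines visited in the same order, same stop tests)
def cmlBody : List String → Int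
  | [] => 0
  | s :: rest =>
    if PySem.Str.len (PySem.Str.strip s) == 0 || PySem.Str.startswith s "def " then 0
    else if PySem.Str.startswith s "#" then cmlBody rest
    else 1 + cmlBody rest

def count_method_len_alt (lines_list : List String) : List (String × Int) :=
  ((PySem.List.enumerate lines_list).foldl
    (fun (d : PySem.Dict String Int) (p : Int × String) =>
      if PySem.Str.startswith p.2 "def " then
        d.insert (pyGetMethodName p.2) (cmlBody (lines_list.drop (p.1.toNat + 1)))
      else d)
    PySem.Dict.empty).items

-- ===== PRECONDITION & SPEC =====
def Spec_count_method_len (lines_list : List String) (out : List (String × Int)) : Prop := out = count_method_len_alt lines_list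
instance (lines_list : List String) (out : List (String × Int)) : Decidable (Spec_count_method_len lines_list out) := by unfold Spec_count_method_len; infer_instance

-- ===== CLAIM (what is proved, stated in full; the proofs are below) =====
def Claim_equal_count_method_len : Prop := ∀ (lines_list : List String), Dom_count_method_len lines_list → Spec_count_method_len lines_list (count_method_len lines_list)

-- ===== LEMMAS AND PROOFS =====

-- common intermediate form: B's dict built by walking suffixes
def cmlRunB : List String → PySem.Dict String Int → PySem.Dict String Int
  | [], d => d
  | li :: rest, d =>
    cmlRunB rest (if PySem.Str.startswith li "def " then
                    d.insert (pyGetMethodName li) (cmlBody rest)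
                  else d)

lemma startswith_def_toList {li : String} (h : PySem.Str.startswith li "def " = true) :
    ∃ t, li.toList = 'd' :: 'e' :: 'f' :: ' ' :: t := by
  simp only [PySem.Str.startswith, PySem.Chars.startswith] at h
  rcases (List.isPrefixOf_iff_prefix.mp h) with ⟨t, ht⟩
  exact ⟨t, ht.symm⟩

-- a "def " line is not blank …
lemma def_not_blank {li : String} (h : PySem.Str.startswith li "def " = true) :
    pyEndOfMethod li = false := by
  obtain ⟨t, ht⟩ := startswith_def_toList h
  have hne : PySem.Chars.strip li.toList ≠ [] := by
    rw [ht]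
    simp only [PySem.Chars.strip, PySem.Chars.lstrip, PySem.Chars.rstrip]
    rw [List.dropWhile_cons_of_neg (by decide)]
    intro hcon
    have h0 : List.dropWhile PySem.Chars.isspace
        (('d' :: 'e' :: 'f' :: ' ' :: t).reverse) = [] := by
      simpa using congrArg List.reverse hcon
    rw [List.dropWhile_eq_nil_iff] at h0
    exact absurd (h0 'd' (by simp)) (by decide)
  unfold pyEndOfMethod
  have hl : (PySem.Str.strip li).toList = PySem.Chars.strip li.toList := by
    simp [PySem.Str.strip]
  simp only [PySem.Str.len, hl]
  simpa [List.length_eq_zero_iff] using hne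

-- … and not a comment
lemma def_not_comment {li : String} (h : PySem.Str.startswith li "def " = true) :
    pyLineIsComment li = false := by
  obtain ⟨t, ht⟩ := startswith_def_toList h
  unfold pyLineIsComment
  simp [PySem.Str.startswith, PySem.Chars.startswith, ht, List.isPrefixOf]

lemma pyLineIsComment_eq (li : String) :
    pyLineIsComment li = PySem.Str.startswith li "#" := by
  unfold pyLineIsComment
  cases PySem.Str.startswith li "#" <;> rfl

-- Python's `methods_dict[m] += 1` on a dict whose m-entry was last set to c
lemma modify_insert_self (d : PySem.Dict String Int) (m : String) (c : Int) :
    (d.insert m c).modify m 0 (· + 1) = d.insert m (c + 1) := by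
  simp only [PySem.Dict.modify, PySem.Dict.getD_insert_self, PySem.Dict.insert_insert_self]

-- unfolding equations for cmlBody and cmlRunB under each line kind
lemma cmlBody_blank {s : String} (rest : List String)
    (h : pyEndOfMethod s = true) : cmlBody (s :: rest) = 0 := by
  unfold pyEndOfMethod at h
  simp [PySem.Str.len, List.length_eq_zero_iff] at h
  simp [cmlBody, h]

lemma cmlBody_def {s : String} (rest : List String)
    (h : PySem.Str.startswith s "def " = true) : cmlBody (s :: rest) = 0 := by
  simp at h
  simp [cmlBody, h]

lemma cmlBody_comment {s : String} (rest : List String)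
    (hb : pyEndOfMethod s = false) (hd : PySem.Str.startswith s "def " = false)
    (hc : pyLineIsComment s = true) : cmlBody (s :: rest) = cmlBody rest := by
  unfold pyEndOfMethod at hb
  rw [pyLineIsComment_eq] at hc
  simp [PySem.Str.len, List.length_eq_zero_iff] at hb
  simp at hd hc
  simp [cmlBody, hb, hd, hc]

lemma cmlBody_plain {s : String} (rest : List String)
    (hb : pyEndOfMethod s = false) (hd : PySem.Str.startswith s "def " = false)
    (hc : pyLineIsComment s = false) : cmlBody (s :: rest) = 1 + cmlBody rest := by
  unfold pyEndOfMethod at hb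
  rw [pyLineIsComment_eq] at hc
  simp [PySem.Str.len, List.length_eq_zero_iff] at hb
  simp at hd hc
  simp [cmlBody, hb, hd, hc]

lemma cmlRunB_def {li : String} (rest : List String) (d : PySem.Dict String Int)
    (h : PySem.Str.startswith li "def " = true) :
    cmlRunB (li :: rest) d = cmlRunB rest (d.insert (pyGetMethodName li) (cmlBody rest)) := by
  simp at h
  simp [cmlRunB, h]

lemma cmlRunB_not_def {li : String} (rest : List String) (d : PySem.Dict String Int)
    (h : PySem.Str.startswith li "def " = false) :
    cmlRunB (li :: rest) d = cmlRunB rest d := by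
  simp at h
  simp [cmlRunB, h]

-- the main invariant, both states of A's register at once
lemma cmlMain : ∀ (rest : List String),
    (∀ d : PySem.Dict String Int,
        (List.foldl cmlStepA (d, none) rest).1 = cmlRunB rest d) ∧
    (∀ (d : PySem.Dict String Int) (m : String) (c : Int),
        (List.foldl cmlStepA (d.insert m c, some m) rest).1
          = cmlRunB rest (d.insert m (c + cmlBody rest))) := by
  intro rest
  induction rest with
  | nil => exact ⟨fun d => rfl, fun d m c => by simp [cmlRunB, cmlBody]⟩
  | cons li rest ih =>
    constructor
    · intro d
      simp only [List.foldl_cons]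
      by_cases hb : pyEndOfMethod li = true
      · have hd : PySem.Str.startswith li "def " = false := by
          rcases Bool.eq_false_or_eq_true (PySem.Str.startswith li "def ") with h | h
          · rw [def_not_blank h] at hb; exact absurd hb (by simp)
          · exact h
        rw [cmlRunB_not_def rest d hd]
        simp only [cmlStepA, hb, if_true]
        exact ih.1 d
      · by_cases hc : pyLineIsComment li = true
        · have hd : PySem.Str.startswith li "def " = false := by
            rcases Bool.eq_false_or_eq_true (PySem.Str.startswith li "def ") with h | h
            · rw [def_not_comment h] at hc; exact absurd hc (by simp)
            · exact h
          rw [cmlRunB_not_def rest d hd]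
          simp only [cmlStepA, hb, hc, if_true]
          exact ih.1 d
        · by_cases hd : PySem.Str.startswith li "def " = true
          · rw [cmlRunB_def rest d hd]
            simp only [cmlStepA, hb, hc, hd, if_true]
            have := ih.2 d (pyGetMethodName li) 0
            simpa using this
          · rw [cmlRunB_not_def rest d (by simpa using hd)]
            simp only [cmlStepA, hb, hc, hd]
            exact ih.1 d
    · intro d m c
      simp only [List.foldl_cons]
      by_cases hb : pyEndOfMethod li = true
      · have hd : PySem.Str.startswith li "def " = false := by
          rcases Bool.eq_false_or_eq_true (PySem.Str.startswith li "def ") with h | h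
          · rw [def_not_blank h] at hb; exact absurd hb (by simp)
          · exact h
        rw [cmlBody_blank rest hb, add_zero, cmlRunB_not_def rest _ hd]
        simp only [cmlStepA, hb, if_true]
        exact ih.1 (d.insert m c)
      · by_cases hc : pyLineIsComment li = true
        · have hd : PySem.Str.startswith li "def " = false := by
            rcases Bool.eq_false_or_eq_true (PySem.Str.startswith li "def ") with h | h
            · rw [def_not_comment h] at hc; exact absurd hc (by simp)
            · exact h
          rw [cmlBody_comment rest (by simpa using hb) hd hc, cmlRunB_not_def rest _ hd]
          simp only [cmlStepA, hb, hc, if_true]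
          exact ih.2 d m c
        · by_cases hd : PySem.Str.startswith li "def " = true
          · rw [cmlBody_def rest hd, add_zero, cmlRunB_def rest _ hd]
            simp only [cmlStepA, hb, hc, hd, if_true]
            have := ih.2 (d.insert m c) (pyGetMethodName li) 0
            simpa using this
          · have hd' : PySem.Str.startswith li "def " = false := by simpa using hd
            rw [cmlBody_plain rest (by simpa using hb) hd' (by simpa using hc),
                cmlRunB_not_def rest _ hd']
            simp only [cmlStepA, hb, hc, hd]
            have hcontains : (d.insert m c).contains m = true :=
              PySem.Dict.contains_insert_self d m c
            simp only [hcontains, if_true]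
            rw [modify_insert_self]
            rw [show c + (1 + cmlBody rest) = (c + 1) + cmlBody rest by ring]
            exact ih.2 d m (c + 1)

-- B's enumerate/drop loop computes cmlRunB
lemma cmlEnum (full : List String) : ∀ (xs : List String) (k : Nat) (d : PySem.Dict String Int),
    List.drop k full = xs →
    List.foldl (fun (d : PySem.Dict String Int) (p : Int × String) =>
        if PySem.Str.startswith p.2 "def " then
          d.insert (pyGetMethodName p.2) (cmlBody (full.drop (p.1.toNat + 1)))
        else d) d (PySem.List.enumerate xs (k : Int))
      = cmlRunB xs d := by
  intro xs
  induction xs with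
  | nil => intro k d h; simp [PySem.List.enumerate_nil, cmlRunB]
  | cons li rest ih =>
    intro k d h
    have hdrop : List.drop (k + 1) full = rest := by
      have h1 : (full.drop k).drop 1 = full.drop (k + 1) := by
        rw [List.drop_drop]
      rw [← h1, h]
      simp
    rw [PySem.List.enumerate_cons, List.foldl_cons]
    have hcast : ((k : Int) + 1) = ((k + 1 : Nat) : Int) := by push_cast; ring
    rw [hcast]
    rw [ih (k + 1) _ hdrop]
    simp only [Int.toNat_natCast, hdrop]
    rfl

-- ===== VERDICT (by name: the statement is the Claim_ definition above) =====
theorem count_method_len_spec : Claim_equal_count_method_len := by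
  intro lines_list _
  unfold Spec_count_method_len count_method_len count_method_len_alt
  have h1 := (cmlMain lines_list).1 PySem.Dict.empty
  have h2 := cmlEnum lines_list lines_list 0 PySem.Dict.empty (by simp)
  rw [h1, ← h2]
  rfl
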